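-- pv_equiv track=rewrite | github.com/SanketJadhav7d3/ProjectEuler | problem_44/main.py | is_pentagon
-- ===== SOURCE A (Python) =====
-- def get_pentagon_num(n):
--     return (n * (3 * n - 1)) // 2
--
-- def is_pentagon(n):
--     i = 1
--     while i <= n:
--         p = get_pentagon_num(i)
--         if p == n:
--             return True
--         i += 1
--     return False
-- ===== SOURCE B (Python) =====
-- def _isqrt(m):
--     # binary search for floor(sqrt(m)), m >= 0
--     if m < 2:
--         return m
--     lo, hi = 0, m
--     while lo + 1 < hi:
--         mid = (lo + hi) // 2
--         if mid * mid <= m: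
--             lo = mid
--         else:
--             hi = mid
--     return lo
--
--
-- def is_pentagon(n):
--     if n < 1:
--         return False
--     m = 24 * n + 1
--     s = _isqrt(m)
--     return s * s == m and s % 6 == 5
-- ===== Notes on version B (the rewrite author's own statement) =====
-- stated objective: faster
-- what changed: Replaces the linear scan over all candidates i=1..n with the inverted pentagonal formula: n is pentagonal iff 24n+1 is a perfect square whose root is congruent to 5 mod 6, using an integer square root by binary search.
import Mathlib
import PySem

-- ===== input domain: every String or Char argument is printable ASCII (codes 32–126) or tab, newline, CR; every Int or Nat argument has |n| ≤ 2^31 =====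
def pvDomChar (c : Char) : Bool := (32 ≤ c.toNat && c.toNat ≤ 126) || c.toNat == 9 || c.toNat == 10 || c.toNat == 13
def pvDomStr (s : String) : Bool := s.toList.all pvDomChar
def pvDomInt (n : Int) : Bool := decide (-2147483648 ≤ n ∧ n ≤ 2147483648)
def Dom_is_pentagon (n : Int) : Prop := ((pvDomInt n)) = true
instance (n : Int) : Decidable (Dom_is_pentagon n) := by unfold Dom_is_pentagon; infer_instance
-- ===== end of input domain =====

-- B replaces A's O(n) linear scan by the inverted pentagonal formula (24n+1 a perfect
-- square with root ≡ 5 mod 6), with an integer square root by binary search: faster.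

-- ===== PORT A =====
def get_pentagon_num (n : Int) : Int := PySem.Int.floordiv (n * (3 * n - 1)) 2

-- while i <= n: fuel n.toNat runs the body exactly for i = 1..n
def isPentLoopA (n : Int) : Int → Nat → Bool
  | _, 0 => false
  | i, f + 1 => if get_pentagon_num i == n then true else isPentLoopA n (i + 1) f

def is_pentagon (n : Int) : Bool := isPentLoopA n 1 n.toNat

-- ===== PORT B =====
-- while lo + 1 < hi: the gap hi - lo shrinks every iteration, so fuel m.toNat suffices
def isqrtLoopB (m : Int) : Int → Int → Nat → Int
  | lo, _, 0 => lo
  | lo, hi, f + 1 =>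
    if lo + 1 < hi then
      let mid := PySem.Int.floordiv (lo + hi) 2
      if mid * mid ≤ m then isqrtLoopB m mid hi f else isqrtLoopB m lo mid f
    else lo

def isqrtB (m : Int) : Int := if m < 2 then m else isqrtLoopB m 0 m m.toNat

def is_pentagon_alt (n : Int) : Bool :=
  if n < 1 then false
  else
    let m := 24 * n + 1
    let s := isqrtB m
    s * s == m && PySem.Int.mod s 6 == 5

-- ===== PRECONDITION & SPEC =====
def Spec_is_pentagon (n : Int) (out : Bool) : Prop := out = is_pentagon_alt n
instance (n : Int) (out : Bool) : Decidable (Spec_is_pentagon n out) := by unfold Spec_is_pentagon; infer_instance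

-- ===== CLAIM (what is proved, stated in full; the proofs are below) =====
def Claim_equal_is_pentagon : Prop := ∀ (n : Int), Dom_is_pentagon n → Spec_is_pentagon n (is_pentagon n)

-- ===== LEMMAS AND PROOFS =====

-- p(j) = n ↔ j*(3j-1) = 2n  (the product is always even, so // 2 is exact)
lemma pent_eq_iff (j n : Int) : get_pentagon_num j = n ↔ j * (3 * j - 1) = 2 * n := by
  unfold get_pentagon_num
  rw [PySem.Int.floordiv_eq_iff_of_pos (by norm_num)]
  obtain ⟨c, hc⟩ : ∃ c : Int, j * (3 * j - 1) = 2 * c := by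
    rcases Int.even_or_odd j with ⟨k, hk⟩ | ⟨k, hk⟩
    · exact ⟨k * (3 * (k + k) - 1), by subst hk; ring⟩
    · exact ⟨(2 * k + 1) * (3 * k + 1), by subst hk; ring⟩
  rw [hc]; omega

lemma loopA_iff (n : Int) : ∀ (f : Nat) (i : Int),
    isPentLoopA n i f = true ↔ ∃ j : Int, i ≤ j ∧ j < i + f ∧ get_pentagon_num j = n := by
  intro f
  induction f with
  | zero =>
    intro i; simp [isPentLoopA]
    intro j h1 h2; omega
  | succ f ih =>
    intro i
    simp only [isPentLoopA]
    by_cases h : get_pentagon_num i = n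
    · simp [h]
      exact ⟨i, le_refl i, by omega, h⟩
    · simp [h, ih]
      constructor
      · rintro ⟨j, h1, h2, h3⟩; exact ⟨j, by omega, by omega, h3⟩
      · rintro ⟨j, h1, h2, h3⟩
        refine ⟨j, ?_, by omega, h3⟩
        rcases eq_or_lt_of_le h1 with rfl | h1'
        · exact absurd h3 h
        · omega

lemma A_iff (n : Int) :
    is_pentagon n = true ↔ ∃ j : Int, 1 ≤ j ∧ j ≤ n ∧ j * (3 * j - 1) = 2 * n := by
  unfold is_pentagon
  rw [loopA_iff]
  constructor
  · rintro ⟨j, h1, h2, h3⟩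
    exact ⟨j, h1, by omega, (pent_eq_iff j n).mp h3⟩
  · rintro ⟨j, h1, h2, h3⟩
    exact ⟨j, h1, by omega, (pent_eq_iff j n).mpr h3⟩

lemma isqrtLoopB_correct (m : Int) : ∀ (f : Nat) (lo hi : Int),
    0 ≤ lo → lo < hi → lo * lo ≤ m → m < hi * hi → hi - lo ≤ (f : Int) →
    0 ≤ isqrtLoopB m lo hi f ∧ isqrtLoopB m lo hi f * isqrtLoopB m lo hi f ≤ m ∧
      m < (isqrtLoopB m lo hi f + 1) * (isqrtLoopB m lo hi f + 1) := by
  intro f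
  induction f with
  | zero => intro lo hi h0 h1 _ _ hf; omega
  | succ f ih =>
    intro lo hi h0 h1 h2 h3 hf
    simp only [isqrtLoopB]
    by_cases hgap : lo + 1 < hi
    · simp only [hgap, if_true]
      have hmid1 : lo + 1 ≤ PySem.Int.floordiv (lo + hi) 2 := by
        rw [PySem.Int.le_floordiv_iff_mul_le (by norm_num)]; omega
      have hmid2 : PySem.Int.floordiv (lo + hi) 2 < hi := by
        rw [PySem.Int.floordiv_lt_iff_lt_mul (by norm_num)]; omega
      set mid := PySem.Int.floordiv (lo + hi) 2 with hmid
      by_cases hc : mid * mid ≤ m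
      · simp only [hc, if_true]
        exact ih mid hi (by omega) (by omega) hc h3 (by push_cast at hf ⊢; omega)
      · simp only [hc, if_false]
        exact ih lo mid h0 (by omega) h2 (by omega) (by push_cast at hf ⊢; omega)
    · simp only [hgap, if_false]
      have : hi = lo + 1 := by omega
      exact ⟨h0, h2, by rw [← this]; exact h3⟩

lemma isqrtB_correct (m : Int) (hm : 0 ≤ m) :
    0 ≤ isqrtB m ∧ isqrtB m * isqrtB m ≤ m ∧ m < (isqrtB m + 1) * (isqrtB m + 1) := by
  unfold isqrtB
  by_cases h : m < 2
  · interval_cases m <;> simp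
  · simp only [h, if_false]
    have h2 : 2 ≤ m := by omega
    refine isqrtLoopB_correct m m.toNat 0 m (le_refl 0) (by omega) (by simpa) (by nlinarith) ?_
    omega

-- if s ≥ 0 and s² = m then isqrtB m = s
lemma isqrtB_of_sq (m s : Int) (hs : 0 ≤ s) (h : s * s = m) : isqrtB m = s := by
  obtain ⟨h0, h1, h2⟩ := isqrtB_correct m (by nlinarith)
  nlinarith

lemma B_iff (n : Int) :
    is_pentagon_alt n = true ↔
      1 ≤ n ∧ ∃ s : Int, 0 ≤ s ∧ s * s = 24 * n + 1 ∧ PySem.Int.mod s 6 = 5 := by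
  unfold is_pentagon_alt
  by_cases hn : n < 1
  · simp [hn]
  · simp only [hn, if_false, Bool.and_eq_true, beq_iff_eq]
    constructor
    · rintro ⟨hsq, hmod⟩
      obtain ⟨h0, _, _⟩ := isqrtB_correct (24 * n + 1) (by omega)
      exact ⟨by omega, isqrtB (24 * n + 1), h0, hsq, hmod⟩
    · rintro ⟨_, s, hs0, hsq, hmod⟩
      rw [isqrtB_of_sq _ s hs0 hsq]
      exact ⟨hsq, hmod⟩

-- the number-theoretic bridge between the two characterisations
lemma bridge (n : Int) :
    (∃ j : Int, 1 ≤ j ∧ j ≤ n ∧ j * (3 * j - 1) = 2 * n) ↔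
      (1 ≤ n ∧ ∃ s : Int, 0 ≤ s ∧ s * s = 24 * n + 1 ∧ PySem.Int.mod s 6 = 5) := by
  constructor
  · rintro ⟨j, hj1, hj2, hj3⟩
    have hn : 1 ≤ n := by nlinarith
    refine ⟨hn, 6 * j - 1, by omega, by nlinarith, ?_⟩
    rw [PySem.Int.mod_eq_emod_of_pos (by norm_num)]
    omega
  · rintro ⟨hn, s, hs0, hsq, hmod⟩
    rw [PySem.Int.mod_eq_emod_of_pos (by norm_num)] at hmod
    obtain ⟨k, hk⟩ : ∃ k : Int, s = 6 * k + 5 := ⟨s / 6, by omega⟩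
    have hk0 : 0 ≤ k := by omega
    refine ⟨k + 1, by omega, ?_, by nlinarith⟩
    nlinarith

-- ===== VERDICT (by name: the statement is the Claim_ definition above) =====
theorem is_pentagon_spec : Claim_equal_is_pentagon := by
  intro n _
  unfold Spec_is_pentagon
  have h := (A_iff n).trans ((bridge n).trans (B_iff n).symm)
  exact Bool.eq_iff_iff.mpr h
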